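-- pv_equiv track=rewrite | github.com/Vaibhav14102006/satyapatra | scripts/train_email_validator.py | extract_email_features
-- ===== SOURCE A (Python) =====
-- def extract_email_features(email):
--     """Extract features from email for ML model"""
--     if not isinstance(email, str):
--         email = str(email)
--
--     features = {}
--
--     # Basic length features
--     features['length'] = len(email)
--     features['has_at'] = 1 if '@' in email else 0
--     features['at_count'] = email.count('@')
--
--     # Character analysis
--     features['has_dot'] = 1 if '.' in email else 0
--     features['dot_count'] = email.count('.')
--     features['has_space'] = 1 if ' ' in email else 0
--     features['has_special_chars'] = 1 if any(c in email for c in '!#$%&*+-/=?^_`{|}~') else 0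
--     features['has_numbers'] = 1 if any(c.isdigit() for c in email) else 0
--     features['has_uppercase'] = 1 if any(c.isupper() for c in email) else 0
--
--     # Structure analysis
--     if '@' in email:
--         parts = email.split('@')
--         features['local_length'] = len(parts[0]) if len(parts) > 0 else 0
--         features['domain_length'] = len(parts[-1]) if len(parts) > 1 else 0
--
--         # Domain analysis
--         if len(parts) > 1 and '.' in parts[-1]:
--             domain_parts = parts[-1].split('.')
--             features['tld_length'] = len(domain_parts[-1]) if domain_parts else 0
--             features['subdomain_count'] = len(domain_parts) - 1
--         else:
--             features['tld_length'] = 0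
--             features['subdomain_count'] = 0
--     else:
--         features['local_length'] = 0
--         features['domain_length'] = 0
--         features['tld_length'] = 0
--         features['subdomain_count'] = 0
--
--     # Pattern matching
--     features['starts_with_dot'] = 1 if email.startswith('.') else 0
--     features['ends_with_dot'] = 1 if email.endswith('.') else 0
--     features['consecutive_dots'] = 1 if '..' in email else 0
--     features['starts_with_at'] = 1 if email.startswith('@') else 0
--     features['ends_with_at'] = 1 if email.endswith('@') else 0
--
--     # Common domain patterns
--     common_domains = ['gmail.com', 'yahoo.com', 'outlook.com', 'hotmail.com']
--     features['common_domain'] = 1 if any(domain in email for domain in common_domains) else 0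
--
--     return list(features.values())
-- ===== SOURCE B (Python) =====
-- def extract_email_features(email):
--     """Extract features from email for ML model"""
--     if not isinstance(email, str):
--         email = str(email)
--
--     # One pass over the characters: counts, flags and run-lengths replace
--     # the separate count()/any()/split() scans of the original.
--     n = at_count = dot_count = 0
--     has_space = has_special = has_digit = has_upper = False
--     local_len = 0   # chars before the first '@'
--     tail_len = 0    # chars since the last '@'
--     tail_dots = 0   # dots since the last '@'
--     run_len = 0     # chars since the last '@' or '.'
--     for c in email:
--         n += 1
--         if c == '@':
--             at_count += 1
--             tail_len = tail_dots = run_len = 0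
--             continue
--         tail_len += 1
--         run_len += 1
--         if c == '.':
--             dot_count += 1
--             tail_dots += 1
--             run_len = 0
--         elif c == ' ':
--             has_space = True
--         elif c in '!#$%&*+-/=?^_`{|}~':
--             has_special = True
--         elif c.isdigit():
--             has_digit = True
--         elif c.isupper():
--             has_upper = True
--         if at_count == 0:
--             local_len += 1
--
--     if at_count:
--         local_length = local_len
--         domain_length = tail_len
--         if tail_dots:
--             tld_length = run_len
--             subdomain_count = tail_dots
--         else:
--             tld_length = 0
--             subdomain_count = 0
--     else:
--         local_length = domain_length = tld_length = subdomain_count = 0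
--
--     return [
--         n,
--         1 if at_count else 0,
--         at_count,
--         1 if dot_count else 0,
--         dot_count,
--         1 if has_space else 0,
--         1 if has_special else 0,
--         1 if has_digit else 0,
--         1 if has_upper else 0,
--         local_length,
--         domain_length,
--         tld_length,
--         subdomain_count,
--         1 if email.startswith('.') else 0,
--         1 if email.endswith('.') else 0,
--         1 if '..' in email else 0,
--         1 if email.startswith('@') else 0,
--         1 if email.endswith('@') else 0,
--         1 if any(d in email for d in ('gmail.com', 'yahoo.com', 'outlook.com', 'hotmail.com')) else 0,
--     ]
-- ===== Notes on version B (the rewrite author's own statement) =====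
-- stated objective: alternative
-- what changed: B replaces A's dozen separate scans (count/any for each feature plus two split() passes for the local/domain/TLD lengths) by a single pass over the characters that accumulates counts, flags and run-lengths (chars before the first '@', chars and dots since the last '@', chars since the last '@' or '.'), deriving every feature from that one traversal; the startswith/endswith/substring checks are kept as in A.
import Mathlib
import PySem

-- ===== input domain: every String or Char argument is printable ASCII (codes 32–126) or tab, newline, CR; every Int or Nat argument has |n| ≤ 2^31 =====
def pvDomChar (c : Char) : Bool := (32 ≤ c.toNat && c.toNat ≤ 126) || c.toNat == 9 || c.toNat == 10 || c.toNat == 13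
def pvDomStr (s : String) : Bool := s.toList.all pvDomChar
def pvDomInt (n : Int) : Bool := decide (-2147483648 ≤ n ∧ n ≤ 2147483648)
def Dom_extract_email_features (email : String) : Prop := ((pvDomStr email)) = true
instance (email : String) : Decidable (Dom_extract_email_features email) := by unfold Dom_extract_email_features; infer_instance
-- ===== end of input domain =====

-- B replaces A's dozen separate count()/any()/split() scans of the email by ONE pass over its
-- characters that accumulates counts, flags and run-lengths; objective: alternative (single pass).

-- ===== PORT A =====
-- the special-character string and the common-domain list of A (B uses the same constants)
def pvSpecialChars : List Char := "!#$%&*+-/=?^_`{|}~".toList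

def pvCommonDomains : List (List Char) :=
  ["gmail.com".toList, "yahoo.com".toList, "outlook.com".toList, "hotmail.com".toList]

-- A fills a dict whose 19 literal keys are distinct and inserted exactly once each, in a fixed
-- order, and returns list(features.values()); the port computes each feature exactly as A does
-- and returns them directly in that same insertion order.
def extract_email_features (email : String) : List Int :=
  let e := email.toList
  let length : Int := e.length
  let has_at : Int := if PySem.Chars.isIn ['@'] e then 1 else 0
  let at_count : Int := PySem.Chars.count e ['@']
  let has_dot : Int := if PySem.Chars.isIn ['.'] e then 1 else 0
  let dot_count : Int := PySem.Chars.count e ['.']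
  let has_space : Int := if PySem.Chars.isIn [' '] e then 1 else 0
  let has_special : Int := if pvSpecialChars.any (fun c => PySem.Chars.isIn [c] e) then 1 else 0
  let has_numbers : Int := if e.any PySem.Chars.isdigit then 1 else 0
  let has_uppercase : Int := if e.any PySem.Chars.isupper then 1 else 0
  let q : Int × Int × Int × Int :=
    if PySem.Chars.isIn ['@'] e then
      let parts := PySem.Chars.splitOn e ['@']
      -- parts[0] / parts[-1]: the guards make pyGet? return some, so getD [] is exact
      let local_length : Int := if 0 < parts.length then ((PySem.List.pyGet? parts 0).getD []).length else 0
      let domain_length : Int := if 1 < parts.length then ((PySem.List.pyGet? parts (-1)).getD []).length else 0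
      if 1 < parts.length ∧ PySem.Chars.isIn ['.'] ((PySem.List.pyGet? parts (-1)).getD []) then
        let domain_parts := PySem.Chars.splitOn ((PySem.List.pyGet? parts (-1)).getD []) ['.']
        let tld_length : Int := if domain_parts ≠ [] then ((PySem.List.pyGet? domain_parts (-1)).getD []).length else 0
        (local_length, domain_length, tld_length, (domain_parts.length : Int) - 1)
      else
        (local_length, domain_length, 0, 0)
    else
      (0, 0, 0, 0)
  let starts_with_dot : Int := if PySem.Chars.startswith e ['.'] then 1 else 0
  let ends_with_dot : Int := if PySem.Chars.endswith e ['.'] then 1 else 0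
  let consecutive_dots : Int := if PySem.Chars.isIn ['.', '.'] e then 1 else 0
  let starts_with_at : Int := if PySem.Chars.startswith e ['@'] then 1 else 0
  let ends_with_at : Int := if PySem.Chars.endswith e ['@'] then 1 else 0
  let common_domain : Int := if pvCommonDomains.any (fun d => PySem.Chars.isIn d e) then 1 else 0
  [length, has_at, at_count, has_dot, dot_count, has_space, has_special, has_numbers,
   has_uppercase, q.1, q.2.1, q.2.2.1, q.2.2.2, starts_with_dot, ends_with_dot,
   consecutive_dots, starts_with_at, ends_with_at, common_domain]

-- ===== PORT B =====
-- the loop state of B's single pass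
structure PvBState where
  n : Int
  atCount : Int
  dotCount : Int
  hasSpace : Bool
  hasSpecial : Bool
  hasDigit : Bool
  hasUpper : Bool
  localLen : Int
  tailLen : Int
  tailDots : Int
  runLen : Int
deriving Repr, DecidableEq

-- one iteration of B's for-loop (the '@' branch is Python's `continue`)
def pvStep (s : PvBState) (c : Char) : PvBState :=
  let s := { s with n := s.n + 1 }
  if c = '@' then
    { s with atCount := s.atCount + 1, tailLen := 0, tailDots := 0, runLen := 0 }
  else
    let s := { s with tailLen := s.tailLen + 1, runLen := s.runLen + 1 }
    let s :=
      if c = '.' then { s with dotCount := s.dotCount + 1, tailDots := s.tailDots + 1, runLen := 0 }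
      else if c = ' ' then { s with hasSpace := true }
      else if PySem.Chars.isIn [c] pvSpecialChars then { s with hasSpecial := true }
      else if PySem.Chars.isdigit c then { s with hasDigit := true }
      else if PySem.Chars.isupper c then { s with hasUpper := true }
      else s
    if s.atCount = 0 then { s with localLen := s.localLen + 1 } else s

def extract_email_features_alt (email : String) : List Int :=
  let e := email.toList
  let s := e.foldl pvStep ⟨0, 0, 0, false, false, false, false, 0, 0, 0, 0⟩
  let q : Int × Int × Int × Int :=
    if s.atCount ≠ 0 then
      if s.tailDots ≠ 0 then (s.localLen, s.tailLen, s.runLen, s.tailDots)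
      else (s.localLen, s.tailLen, 0, 0)
    else (0, 0, 0, 0)
  [s.n,
   if s.atCount ≠ 0 then 1 else 0,
   s.atCount,
   if s.dotCount ≠ 0 then 1 else 0,
   s.dotCount,
   if s.hasSpace then 1 else 0,
   if s.hasSpecial then 1 else 0,
   if s.hasDigit then 1 else 0,
   if s.hasUpper then 1 else 0,
   q.1, q.2.1, q.2.2.1, q.2.2.2,
   if PySem.Chars.startswith e ['.'] then 1 else 0,
   if PySem.Chars.endswith e ['.'] then 1 else 0,
   if PySem.Chars.isIn ['.', '.'] e then 1 else 0,
   if PySem.Chars.startswith e ['@'] then 1 else 0,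
   if PySem.Chars.endswith e ['@'] then 1 else 0,
   if pvCommonDomains.any (fun d => PySem.Chars.isIn d e) then 1 else 0]

-- ===== PRECONDITION & SPEC =====
def Spec_extract_email_features (email : String) (out : List Int) : Prop := out = extract_email_features_alt email
instance (email : String) (out : List Int) : Decidable (Spec_extract_email_features email out) := by unfold Spec_extract_email_features; infer_instance

-- ===== CLAIM (what is proved, stated in full; the proofs are below) =====
def Claim_equal_extract_email_features : Prop := ∀ (email : String), Dom_extract_email_features email → Spec_extract_email_features email (extract_email_features email)

-- ===== LEMMAS AND PROOFS =====

def pvPieces (c : Char) : List Char → List (List Char)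
  | [] => [[]]
  | x :: xs => if x = c then [] :: pvPieces c xs
               else (x :: (pvPieces c xs).headD []) :: (pvPieces c xs).tail

def pvAfter (p : Char → Bool) : List Char → List Char
  | [] => []
  | x :: xs => if xs.any p then pvAfter p xs
               else if p x then xs else x :: pvAfter p xs

theorem pvPieces_ne_nil (c : Char) (l : List Char) : pvPieces c l ≠ [] := by
  cases l <;> simp [pvPieces] ; split <;> simp

theorem pvPieces_headD (c : Char) (l : List Char) :
    (pvPieces c l).headD [] = l.takeWhile (fun x => x != c) := by
  induction l with
  | nil => simp [pvPieces]
  | cons x xs ih =>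
    by_cases h : x = c
    · simp [pvPieces, h]
    · rcases hp : pvPieces c xs with _ | ⟨a, t⟩
      · exact absurd hp (pvPieces_ne_nil c xs)
      · rw [hp] at ih; simp [pvPieces, h, hp, List.takeWhile_cons]
        simpa using ih

theorem pvPieces_length (c : Char) (l : List Char) :
    (pvPieces c l).length = l.count c + 1 := by
  induction l with
  | nil => simp [pvPieces]
  | cons x xs ih =>
    by_cases h : x = c
    · simp [pvPieces, h, List.count_cons, ih]
    · rcases hp : pvPieces c xs with _ | ⟨a, t⟩
      · exact absurd hp (pvPieces_ne_nil c xs)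
      · rw [hp] at ih
        simp [pvPieces, h, hp, List.count_cons] at *
        omega

theorem pvAfter_of_not_any (p : Char → Bool) (l : List Char) (h : l.any p = false) :
    pvAfter p l = l := by
  induction l with
  | nil => rfl
  | cons x xs ih =>
    simp at h
    have hxs : xs.any p = false := by
      simp only [List.any_eq_false]; intro a ha; simp [h.2 a ha]
    simp [pvAfter, hxs, h.1, ih hxs]

theorem pvAfter_or_of_not_any (p q : Char → Bool) (l : List Char) (h : l.any p = false) :
    pvAfter (fun c => p c || q c) l = pvAfter q l := by
  induction l with
  | nil => rfl
  | cons x xs ih =>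
    simp at h
    have hxs : xs.any p = false := by
      simp only [List.any_eq_false]; intro a ha; simp [h.2 a ha]
    have hany : (xs.any fun c => p c || q c) = xs.any q := by
      rcases hq : xs.any q
      · simp only [List.any_eq_false] at hxs hq ⊢
        intro a ha; simp [hxs a ha, hq a ha]
      · simp only [List.any_eq_true] at hq ⊢
        obtain ⟨a, ha, hqa⟩ := hq; exact ⟨a, ha, by simp [hqa]⟩
    simp [pvAfter, hany, h.1, ih hxs]

theorem pvCount_eq_zero_of_not_any (c : Char) (xs : List Char)
    (h : (xs.any fun y => y == c) = false) : xs.count c = 0 := by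
  rw [List.count_eq_zero]
  intro hc
  have := List.any_eq_false.1 h c hc; simp at this

theorem pvAny_of_count_pos (c : Char) (xs : List Char) (h : 0 < xs.count c) :
    (xs.any fun y => y == c) = true := by
  rw [List.count_pos_iff] at h
  exact List.any_eq_true.2 ⟨c, h, by simp⟩

theorem pvPieces_getLastD (c : Char) (l : List Char) :
    (pvPieces c l).getLastD [] = pvAfter (fun x => x == c) l := by
  induction l with
  | nil => simp [pvPieces, pvAfter]
  | cons x xs ih =>
    rcases hp : pvPieces c xs with _ | ⟨a, t⟩
    · exact absurd hp (pvPieces_ne_nil c xs)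
    · rw [hp] at ih
      by_cases h : x = c
      · have hrhs : pvAfter (fun y => y == c) (x :: xs) = pvAfter (fun y => y == c) xs := by
          rcases hany : xs.any fun y => y == c
          · simp [pvAfter, hany, h, pvAfter_of_not_any _ _ hany]
          · simp [pvAfter, hany]
        subst h
        rw [hrhs, ← ih]
        show (pvPieces x (x :: xs)).getLastD [] = _
        simp only [pvPieces, if_pos rfl, hp, List.getLastD_cons]
        simp [List.getLastD_cons]
        cases t with
        | nil => simp
        | cons b t' =>
          rcases hl : (b :: t').getLast? with _ | v
          · simp [List.getLast?_eq_none_iff] at hl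
          · simp [hl]
      · rcases t with _ | ⟨b, t'⟩
        · -- single piece: no c in xs
          have hlen := pvPieces_length c xs
          rw [hp] at hlen; simp at hlen
          have hany : (xs.any fun y => y == c) = false := by
            rcases hq : xs.any fun y => y == c
            · rfl
            · have := pvCount_eq_zero_of_not_any c xs
              simp only [List.any_eq_true] at hq
              obtain ⟨y, hy, hyc⟩ := hq
              have : 0 < xs.count c := by
                simp at hyc; subst hyc; exact List.count_pos_iff.2 hy
              omega
          have hhead : a = xs := by
            have := pvPieces_headD c xs
            rw [hp] at this; simp at this
            rw [this, List.takeWhile_eq_self_iff.2]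
            intro y hy; simp
            intro hyc; subst hyc
            have := List.any_eq_false.1 hany y hy; simp at this
          simp [pvPieces, h, hp, pvAfter, hany, hhead]
          exact (pvAfter_of_not_any _ _ hany).symm
        · have hlen := pvPieces_length c xs
          rw [hp] at hlen; simp at hlen
          have hany : (xs.any fun y => y == c) = true := by
            apply pvAny_of_count_pos; omega
          simp [pvPieces, h, hp, pvAfter, hany] at *
          exact ih

theorem pvAfter_after (p q : Char → Bool) (l : List Char) :
    pvAfter q (pvAfter p l) = pvAfter (fun c => p c || q c) l := by
  induction l with
  | nil => rfl
  | cons x xs ih =>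
    rcases hp : xs.any p
    · have hpq : (xs.any fun c => p c || q c) = xs.any q := by
        rcases hq : xs.any q
        · simp only [List.any_eq_false] at hp hq ⊢
          intro a ha; simp [hp a ha, hq a ha]
        · simp only [List.any_eq_true] at hq ⊢
          obtain ⟨a, ha, hqa⟩ := hq; exact ⟨a, ha, by simp [hqa]⟩
      have hro := pvAfter_or_of_not_any p q xs hp
      have hrp := pvAfter_of_not_any p xs hp
      rcases hq : xs.any q
      · have hrq := pvAfter_of_not_any q xs hq
        by_cases hx : p x = true
        · simp [pvAfter, hp, hq, hpq, hx, hro, hrq]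
        · by_cases hqx : q x = true
          · simp [pvAfter, hp, hq, hpq, hx, hqx, hrp, hro, hrq]
          · simp [pvAfter, hp, hq, hpq, hx, hqx, hrp, hro, hrq]
      · by_cases hx : p x = true
        · simp [pvAfter, hp, hq, hpq, hx, hro]
        · by_cases hqx : q x = true
          · simp [pvAfter, hp, hq, hpq, hx, hqx, hrp, hro]
          · simp [pvAfter, hp, hq, hpq, hx, hqx, hrp, hro]
    · have hpq : (xs.any fun c => p c || q c) = true := by
        simp only [List.any_eq_true] at hp ⊢
        obtain ⟨a, ha, hpa⟩ := hp; exact ⟨a, ha, by simp [hpa]⟩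
      simp [pvAfter, hp, hpq, ih]

theorem pvSplitOn_go (c : Char) (fuel : Nat) (l cur : List Char) (acc : List (List Char))
    (h : l.length ≤ fuel) :
    PySem.Chars.splitOn.go [c] fuel l cur acc =
      acc.reverse ++ (cur.reverse ++ (pvPieces c l).headD []) :: (pvPieces c l).tail := by
  induction fuel generalizing l cur acc with
  | zero =>
    have : l = [] := by cases l <;> simp_all
    subst this
    simp [PySem.Chars.splitOn.go, pvPieces]
  | succ fuel ih =>
    cases l with
    | nil => simp [PySem.Chars.splitOn.go, pvPieces]
    | cons x rest =>
      simp only [PySem.Chars.splitOn.go]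
      by_cases hx : x = c
      · have hpre : [c].isPrefixOf (x :: rest) = true := by simp [List.isPrefixOf, hx]
        rw [if_pos hpre]
        simp only [List.length_cons] at h
        rw [show List.drop [c].length (x :: rest) = rest from by simp]
        rw [ih rest [] (cur.reverse :: acc) (by omega)]
        rcases hp : pvPieces c rest with _ | ⟨a, t⟩
        · exact absurd hp (pvPieces_ne_nil c rest)
        · simp [pvPieces, hx, hp]
      · have hpre : [c].isPrefixOf (x :: rest) = false := by
          simp [List.isPrefixOf]; exact fun hh => hx hh.symm
        rw [if_neg (by simp [hpre])]
        simp only [List.length_cons] at h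
        rw [ih rest (x :: cur) acc (by omega)]
        rcases hp : pvPieces c rest with _ | ⟨a, t⟩
        · exact absurd hp (pvPieces_ne_nil c rest)
        · simp [pvPieces, hx, hp]

theorem pvSplitOn_eq (c : Char) (l : List Char) :
    PySem.Chars.splitOn l [c] = pvPieces c l := by
  rw [PySem.Chars.splitOn, pvSplitOn_go c (l.length + 1) l [] [] (by omega)]
  rcases hp : pvPieces c l with _ | ⟨a, t⟩
  · exact absurd hp (pvPieces_ne_nil c l)
  · simp

theorem pvCount_go (c : Char) (fuel : Nat) (l : List Char) (acc : Nat) (h : l.length ≤ fuel) :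
    PySem.Chars.count.go [c] fuel l acc = acc + l.count c := by
  induction fuel generalizing l acc with
  | zero =>
    have : l = [] := by cases l <;> simp_all
    subst this; simp [PySem.Chars.count.go]
  | succ fuel ih =>
    cases l with
    | nil => simp [PySem.Chars.count.go]
    | cons x rest =>
      simp only [PySem.Chars.count.go]
      simp only [List.length_cons] at h
      by_cases hx : x = c
      · have hpre : [c].isPrefixOf (x :: rest) = true := by simp [List.isPrefixOf, hx]
        rw [if_pos hpre, show List.drop [c].length (x :: rest) = rest from by simp,
            ih rest (acc+1) (by omega)]
        subst hx
        simp [List.count_cons]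
        omega
      · have hpre : [c].isPrefixOf (x :: rest) = false := by
          simp [List.isPrefixOf]; exact fun hh => hx hh.symm
        rw [if_neg (by simp [hpre]), ih rest acc (by omega)]
        simp [List.count_cons]
        intro hc; exact absurd hc hx

theorem pvCount_single (l : List Char) (c : Char) :
    PySem.Chars.count l [c] = l.count c := by
  rw [PySem.Chars.count]
  simp [pvCount_go c l.length l 0 (by omega)]

theorem pvIsIn_single (c : Char) (l : List Char) :
    PySem.Chars.isIn [c] l = l.any (fun x => x == c) := by
  rcases h : l.any (fun x => x == c)
  · rw [PySem.Chars.isIn_eq_false_iff]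
    intro hinf
    have hc : c ∈ l := List.singleton_sublist.1 hinf.sublist
    have := List.any_eq_false.1 h c hc; simp at this
  · rw [PySem.Chars.isIn_iff_infix]
    simp only [List.any_eq_true] at h
    obtain ⟨a, ha, hac⟩ := h
    simp at hac; subst hac
    obtain ⟨s, t, rfl⟩ := List.append_of_mem ha
    exact ⟨s, t, by simp⟩

theorem pvGet_zero {α : Type} (x : α) (t : List α) :
    PySem.List.pyGet? (x :: t) 0 = some x := by
  simp [PySem.List.pyGet?, PySem.List.pyIdx?]

theorem pvGet_neg_one {α : Type} [Inhabited α] (l : List α) (h : l ≠ []) :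
    PySem.List.pyGet? l (-1) = some (l.getLastD default) := by
  have hn : 0 < l.length := List.length_pos_iff.2 h
  simp only [PySem.List.pyGet?, PySem.List.pyIdx?]
  rw [if_neg (by omega), if_pos (by push_cast; omega)]
  simp [List.getLastD_eq_getLast?, List.getLast?_eq_getElem?]
  rw [List.getElem?_eq_getElem (by omega)]
  simp

theorem pvStep_n (s : PvBState) (x : Char) : (pvStep s x).n = s.n + 1 := by
  simp only [pvStep]; split_ifs <;> simp_all
theorem pvStep_atCount_at (s : PvBState) : (pvStep s '@').atCount = s.atCount + 1 := by
  simp only [pvStep]; split_ifs <;> simp_all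
theorem pvStep_atCount (s : PvBState) (x : Char) (hx : x ≠ '@') : (pvStep s x).atCount = s.atCount := by
  simp only [pvStep]; split_ifs <;> simp_all
theorem pvStep_dotCount_dot (s : PvBState) : (pvStep s '.').dotCount = s.dotCount + 1 := by
  simp only [pvStep]; split_ifs <;> simp_all
theorem pvStep_dotCount (s : PvBState) (x : Char) (hx : x ≠ '.') : (pvStep s x).dotCount = s.dotCount := by
  simp only [pvStep]; split_ifs <;> simp_all
theorem pvStep_hasSpace (s : PvBState) (x : Char) :
    (pvStep s x).hasSpace = (s.hasSpace || (x == ' ')) := by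
  simp only [pvStep]; split_ifs <;> simp_all
theorem pvSpec_mem (x : Char) (h : PySem.Chars.isIn [x] pvSpecialChars = true) :
    x ∈ pvSpecialChars := by
  rw [pvIsIn_single] at h
  simp only [List.any_eq_true] at h
  obtain ⟨a, ha, hax⟩ := h
  simp at hax; subst hax; exact ha

theorem pvSpec_not_digit (x : Char) (h : PySem.Chars.isIn [x] pvSpecialChars = true) :
    PySem.Chars.isdigit x = false := by
  have hm := pvSpec_mem x h
  have hall : pvSpecialChars.all (fun c => !PySem.Chars.isdigit c) = true := by decide
  have := List.all_eq_true.1 hall x hm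
  simpa using this

theorem pvSpec_not_upper (x : Char) (h : PySem.Chars.isIn [x] pvSpecialChars = true) :
    PySem.Chars.isupper x = false := by
  have hm := pvSpec_mem x h
  have hall : pvSpecialChars.all (fun c => !PySem.Chars.isupper c) = true := by decide
  have := List.all_eq_true.1 hall x hm
  simpa using this

theorem pvDigit_not_upper (x : Char) (h : PySem.Chars.isdigit x = true) :
    PySem.Chars.isupper x = false := by
  simp only [PySem.Chars.isdigit, Bool.and_eq_true, decide_eq_true_eq] at h
  have hnA : ¬ ('A' ≤ x) := by
    intro hA
    have h9 : x ≤ '9' := h.2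
    rw [Char.le_def] at h9 hA
    have a := UInt32.le_iff_toNat_le.1 h9
    have b := UInt32.le_iff_toNat_le.1 hA
    simp at a b; omega
  simp [PySem.Chars.isupper, hnA]

theorem pvStep_hasSpecial (s : PvBState) (x : Char) :
    (pvStep s x).hasSpecial = (s.hasSpecial || PySem.Chars.isIn [x] pvSpecialChars) := by
  by_cases hsp : PySem.Chars.isIn [x] pvSpecialChars = true
  · simp only [pvStep]; split_ifs <;> simp_all <;>
      (try (first | (exact absurd hsp (by decide)) | (subst_eqs; exact absurd hsp (by decide))))
  · simp only [pvStep]; split_ifs <;> simp_all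

theorem pvStep_hasDigit (s : PvBState) (x : Char) :
    (pvStep s x).hasDigit = (s.hasDigit || PySem.Chars.isdigit x) := by
  by_cases hsp : PySem.Chars.isIn [x] pvSpecialChars = true
  · have hd := pvSpec_not_digit x hsp
    simp only [pvStep]; split_ifs <;> simp_all
  · simp only [pvStep]; split_ifs <;> simp_all <;>
      (try (intro hK; first | (exact absurd hK (by decide)) | (subst_eqs; exact absurd hK (by decide))))

theorem pvStep_hasUpper (s : PvBState) (x : Char) :
    (pvStep s x).hasUpper = (s.hasUpper || PySem.Chars.isupper x) := by
  by_cases hsp : PySem.Chars.isIn [x] pvSpecialChars = true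
  · have hu := pvSpec_not_upper x hsp
    simp only [pvStep]; split_ifs <;> simp_all
  · by_cases hdg : PySem.Chars.isdigit x = true
    · have hu := pvDigit_not_upper x hdg
      simp only [pvStep]; split_ifs <;> simp_all
    · simp only [pvStep]; split_ifs <;> simp_all <;>
        (try (intro hK; first | (exact absurd hK (by decide)) | (subst_eqs; exact absurd hK (by decide))))

theorem pvStep_localLen_at (s : PvBState) : (pvStep s '@').localLen = s.localLen := by
  simp only [pvStep]; split_ifs <;> simp_all

theorem pvStep_localLen (s : PvBState) (x : Char) (hx : x ≠ '@') :
    (pvStep s x).localLen = if s.atCount = 0 then s.localLen + 1 else s.localLen := by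
  simp only [pvStep]; split_ifs <;> simp_all

theorem pvStep_tailLen_at (s : PvBState) : (pvStep s '@').tailLen = 0 := by
  simp only [pvStep]; split_ifs <;> simp_all

theorem pvStep_tailLen (s : PvBState) (x : Char) (hx : x ≠ '@') :
    (pvStep s x).tailLen = s.tailLen + 1 := by
  simp only [pvStep]; split_ifs <;> simp_all

theorem pvStep_tailDots_at (s : PvBState) : (pvStep s '@').tailDots = 0 := by
  simp only [pvStep]; split_ifs <;> simp_all

theorem pvStep_tailDots_dot (s : PvBState) : (pvStep s '.').tailDots = s.tailDots + 1 := by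
  simp only [pvStep]; split_ifs <;> simp_all

theorem pvStep_tailDots (s : PvBState) (x : Char) (hx : x ≠ '@') (hd : x ≠ '.') :
    (pvStep s x).tailDots = s.tailDots := by
  simp only [pvStep]; split_ifs <;> simp_all

theorem pvStep_runLen_reset (s : PvBState) (x : Char) (hx : x = '@' ∨ x = '.') :
    (pvStep s x).runLen = 0 := by
  rcases hx with rfl | rfl <;> (simp only [pvStep]; split_ifs <;> simp_all)

theorem pvStep_runLen (s : PvBState) (x : Char) (hx : x ≠ '@') (hd : x ≠ '.') :
    (pvStep s x).runLen = s.runLen + 1 := by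
  simp only [pvStep]; split_ifs <;> simp_all

theorem pvFold_n (l : List Char) (s : PvBState) :
    (l.foldl pvStep s).n = s.n + l.length := by
  induction l generalizing s with
  | nil => simp
  | cons x xs ih => rw [List.foldl_cons, ih, pvStep_n]; simp; omega

theorem pvFold_atCount (l : List Char) (s : PvBState) :
    (l.foldl pvStep s).atCount = s.atCount + l.count '@' := by
  induction l generalizing s with
  | nil => simp
  | cons x xs ih =>
    rw [List.foldl_cons, ih]
    by_cases hx : x = '@'
    · subst hx; rw [pvStep_atCount_at]; simp [List.count_cons] <;> omega
    · rw [pvStep_atCount s x hx, List.count_cons, if_neg (by simpa using hx)]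
      simp

theorem pvFold_dotCount (l : List Char) (s : PvBState) :
    (l.foldl pvStep s).dotCount = s.dotCount + l.count '.' := by
  induction l generalizing s with
  | nil => simp
  | cons x xs ih =>
    rw [List.foldl_cons, ih]
    by_cases hx : x = '.'
    · subst hx; rw [pvStep_dotCount_dot]; simp [List.count_cons] <;> omega
    · rw [pvStep_dotCount s x hx, List.count_cons, if_neg (by simpa using hx)]
      simp

theorem pvFold_hasSpace (l : List Char) (s : PvBState) :
    (l.foldl pvStep s).hasSpace = (s.hasSpace || l.any (fun c => c == ' ')) := by
  induction l generalizing s with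
  | nil => simp
  | cons x xs ih => rw [List.foldl_cons, ih, pvStep_hasSpace]; simp [Bool.or_assoc]

theorem pvFold_hasSpecial (l : List Char) (s : PvBState) :
    (l.foldl pvStep s).hasSpecial = (s.hasSpecial || l.any (fun c => PySem.Chars.isIn [c] pvSpecialChars)) := by
  induction l generalizing s with
  | nil => simp
  | cons x xs ih => rw [List.foldl_cons, ih, pvStep_hasSpecial]; simp [Bool.or_assoc]

theorem pvFold_hasDigit (l : List Char) (s : PvBState) :
    (l.foldl pvStep s).hasDigit = (s.hasDigit || l.any PySem.Chars.isdigit) := by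
  induction l generalizing s with
  | nil => simp
  | cons x xs ih => rw [List.foldl_cons, ih, pvStep_hasDigit]; simp [Bool.or_assoc]

theorem pvFold_hasUpper (l : List Char) (s : PvBState) :
    (l.foldl pvStep s).hasUpper = (s.hasUpper || l.any PySem.Chars.isupper) := by
  induction l generalizing s with
  | nil => simp
  | cons x xs ih => rw [List.foldl_cons, ih, pvStep_hasUpper]; simp [Bool.or_assoc]

theorem pvFold_localLen (l : List Char) (s : PvBState) (hs : 0 ≤ s.atCount) :
    (l.foldl pvStep s).localLen =
      if s.atCount = 0 then s.localLen + ((l.takeWhile (fun x => x != '@')).length : Int)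
      else s.localLen := by
  induction l generalizing s with
  | nil => simp
  | cons x xs ih =>
    rw [List.foldl_cons]
    by_cases hx : x = '@'
    · subst hx
      rw [ih (pvStep s '@') (by rw [pvStep_atCount_at]; omega)]
      rw [if_neg (by rw [pvStep_atCount_at]; omega), pvStep_localLen_at]
      simp [List.takeWhile_cons]
    · rw [ih (pvStep s x) (by rw [pvStep_atCount s x hx]; omega)]
      rw [pvStep_atCount s x hx, pvStep_localLen s x hx]
      by_cases h0 : s.atCount = 0
      · simp only [h0, if_pos rfl]
        simp [List.takeWhile_cons, hx]
        omega
      · simp [h0]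

theorem pvFold_tailLen (l : List Char) (s : PvBState) :
    (l.foldl pvStep s).tailLen =
      if l.any (fun c => c == '@') then ((pvAfter (fun c => c == '@') l).length : Int)
      else s.tailLen + l.length := by
  induction l generalizing s with
  | nil => simp
  | cons x xs ih =>
    rw [List.foldl_cons, ih]
    rcases h2 : xs.any fun c => c == '@'
    · by_cases hx : x = '@'
      · subst hx
        simp [h2, pvStep_tailLen_at, pvAfter, pvAfter_of_not_any _ _ h2]
      · rw [pvStep_tailLen s x hx]
        simp [h2, hx, List.any_cons]
        omega
    · by_cases hx : x = '@'
      · subst hx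
        simp [h2, pvStep_tailLen_at, pvAfter]
      · rw [pvStep_tailLen s x hx]
        simp [h2, hx, List.any_cons, pvAfter]

theorem pvFold_tailDots (l : List Char) (s : PvBState) :
    (l.foldl pvStep s).tailDots =
      if l.any (fun c => c == '@') then ((pvAfter (fun c => c == '@') l).count '.' : Int)
      else s.tailDots + l.count '.' := by
  induction l generalizing s with
  | nil => simp
  | cons x xs ih =>
    rw [List.foldl_cons, ih]
    rcases h2 : xs.any fun c => c == '@'
    · by_cases hx : x = '@'
      · subst hx
        simp [h2, pvStep_tailDots_at, pvAfter, pvAfter_of_not_any _ _ h2]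
      · by_cases hd : x = '.'
        · subst hd
          rw [pvStep_tailDots_dot]
          simp [h2, List.any_cons, List.count_cons]
          omega
        · rw [pvStep_tailDots s x hx hd]
          rw [List.count_cons, if_neg (by simpa using hd)]
          simp [h2, hx, List.any_cons]
          omega
    · by_cases hx : x = '@'
      · subst hx
        simp [h2, pvStep_tailDots_at, pvAfter]
      · by_cases hd : x = '.'
        · subst hd
          rw [pvStep_tailDots_dot]
          simp [h2, List.any_cons, pvAfter]
        · rw [pvStep_tailDots s x hx hd]
          simp [h2, hx, List.any_cons, pvAfter]

theorem pvFold_runLen (l : List Char) (s : PvBState) :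
    (l.foldl pvStep s).runLen =
      if l.any (fun c => c == '@' || c == '.') then ((pvAfter (fun c => c == '@' || c == '.') l).length : Int)
      else s.runLen + l.length := by
  induction l generalizing s with
  | nil => simp
  | cons x xs ih =>
    rw [List.foldl_cons, ih]
    rcases h2 : xs.any fun c => c == '@' || c == '.'
    · by_cases hx : x = '@' ∨ x = '.'
      · rw [pvStep_runLen_reset s x hx]
        have hpx : ((fun c => c == '@' || c == '.') x) = true := by
          rcases hx with rfl | rfl <;> simp
        simp [h2, hpx, pvAfter, pvAfter_of_not_any _ _ h2, List.any_cons]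
      · push_neg at hx
        rw [pvStep_runLen s x hx.1 hx.2]
        simp [h2, hx.1, hx.2, List.any_cons]
        omega
    · by_cases hx : x = '@' ∨ x = '.'
      · rw [pvStep_runLen_reset s x hx]
        have hpx : ((fun c => c == '@' || c == '.') x) = true := by
          rcases hx with rfl | rfl <;> simp
        simp [h2, hpx, pvAfter, List.any_cons]
      · push_neg at hx
        rw [pvStep_runLen s x hx.1 hx.2]
        simp [h2, hx.1, hx.2, List.any_cons, pvAfter]


theorem pvCount_ne_zero_iff_any (l : List Char) (c : Char) :
    (l.count c ≠ 0) ↔ (l.any fun x => x == c) = true := by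
  rw [List.any_eq_true]
  constructor
  · intro h
    have : 0 < l.count c := Nat.pos_of_ne_zero h
    rw [List.count_pos_iff] at this
    exact ⟨c, this, by simp⟩
  · rintro ⟨a, ha, hac⟩
    simp at hac; subst hac
    have : 0 < l.count a := List.count_pos_iff.2 ha
    omega

theorem pvAny_or_left (l : List Char) (h : (l.any fun c => c == '@') = true) :
    (l.any fun c => c == '@' || c == '.') = true := by
  simp only [List.any_eq_true] at h ⊢
  obtain ⟨a, ha, hc⟩ := h
  exact ⟨a, ha, by simp at hc; simp [hc]⟩


theorem pvPieces_get_zero (c : Char) (l : List Char) :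
    (PySem.List.pyGet? (pvPieces c l) 0).getD [] = l.takeWhile (fun x => x != c) := by
  rcases hp : pvPieces c l with _ | ⟨a, t⟩
  · exact absurd hp (pvPieces_ne_nil c l)
  · rw [pvGet_zero]
    have := pvPieces_headD c l
    rw [hp] at this; simpa using this

theorem pvPieces_get_neg_one (c : Char) (l : List Char) :
    (PySem.List.pyGet? (pvPieces c l) (-1)).getD [] = pvAfter (fun x => x == c) l := by
  rw [pvGet_neg_one _ (pvPieces_ne_nil c l)]
  have hdef : (default : List Char) = [] := rfl
  rw [Option.getD_some, hdef, pvPieces_getLastD]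

theorem pvCountInt_ne_zero (l : List Char) (c : Char) :
    (¬ ((l.count c : Int) = 0)) ↔ (l.any fun x => x == c) = true := by
  rw [← pvCount_ne_zero_iff_any]
  constructor
  · intro h hc; exact h (by exact_mod_cast hc)
  · intro h hc; exact h (by exact_mod_cast hc)

theorem pvAny_swap (l1 l2 : List Char) :
    (l1.any fun c => l2.any fun x => x == c) = (l2.any fun c => l1.any fun x => x == c) := by
  rw [Bool.eq_iff_iff]
  simp only [List.any_eq_true, beq_iff_eq]
  constructor
  · rintro ⟨a, ha, b, hb, hba⟩; subst hba; exact ⟨_, hb, _, ha, rfl⟩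
  · rintro ⟨a, ha, b, hb, hba⟩; subst hba; exact ⟨_, hb, _, ha, rfl⟩

-- ===== VERDICT (by name: the statement is the Claim_ definition above) =====
theorem extract_email_features_spec : Claim_equal_extract_email_features := by
  intro email _
  unfold Spec_extract_email_features
  simp only [extract_email_features, extract_email_features_alt]
  simp only [pvFold_n, pvFold_atCount, pvFold_dotCount, pvFold_hasSpace, pvFold_hasSpecial,
    pvFold_hasDigit, pvFold_hasUpper, pvFold_tailLen, pvFold_tailDots, pvFold_runLen,
    pvFold_localLen email.toList (⟨0,0,0,false,false,false,false,0,0,0,0⟩ : PvBState) (by norm_num), pvCount_single, pvIsIn_single, pvSplitOn_eq]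
  simp only [pvPieces_get_zero, pvPieces_get_neg_one, pvPieces_length, pvAfter_after,
    ne_eq, pvPieces_ne_nil, not_false_iff, if_true, pvCountInt_ne_zero, zero_add,
    Bool.false_or, pvAny_swap]
  by_cases hat : (email.toList.any fun c => c == '@') = true
  · have hcnt : email.toList.count '@' ≠ 0 := (pvCount_ne_zero_iff_any _ _).2 hat
    have h1 : 1 < email.toList.count '@' + 1 := by omega
    have h0 : 0 < email.toList.count '@' + 1 := by omega
    have hator := pvAny_or_left _ hat
    simp only [hat, if_true, h1, h0, true_and, pvCountInt_ne_zero, hator]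
    by_cases hdot : ((pvAfter (fun x => x == '@') email.toList).any fun x => x == '.') = true
    · simp only [hdot, if_true]
      simp only [List.cons.injEq]
      repeat' apply And.intro
      all_goals first | rfl | omega | (push_cast; try omega)
    · simp only [Bool.not_eq_true] at hdot
      simp only [hdot]
      simp only [List.cons.injEq]
      repeat' apply And.intro
      all_goals first | rfl | omega | (push_cast; try omega)
  · simp only [Bool.not_eq_true] at hat
    have hcnt : email.toList.count '@' = 0 := by
      rw [List.count_eq_zero]
      intro hm
      have := List.any_eq_false.1 hat '@' hm
      simp at this
    simp only [hat, hcnt]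
    simp only [List.cons.injEq]
    repeat' apply And.intro
    all_goals first | rfl | omega | (push_cast; try omega)
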